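-- pv_equiv track=rewrite | github.com/Chiki1601/Hackerearth-Solutions | Algorithms/Sorting/Counting sort/Finding pairs.py | modifiedCountingSort
-- ===== SOURCE A (Python) =====
-- def modifiedCountingSort(arr):
--     maxElement = max(arr)
--     countArr = {}
--
--     for element in arr:
--         if element in countArr:
--             countArr[element]+=1
--         else:
--             countArr[element]=1
--
--     ans = 0
--     for index in countArr:
--         count=countArr[index]
--         ans+= ((count)*(count+1))//2
--     return ans
-- ===== SOURCE B (Python) =====
-- def modifiedCountingSort(arr):
--     ans = 0
--     run = 0
--     prev = None
--     for x in sorted(arr):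
--         if run and x == prev:
--             run += 1
--         else:
--             ans += run * (run + 1) // 2
--             run = 1
--             prev = x
--     ans += run * (run + 1) // 2
--     return ans
-- ===== Notes on version B (the rewrite author's own statement) =====
-- stated objective: alternative
-- what changed: Replaced A's hash-map frequency table plus per-key triangle sum by a single sort-then-group pass that tracks the current run length over sorted(arr) and adds run*(run+1)//2 at each value change.
import Mathlib
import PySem

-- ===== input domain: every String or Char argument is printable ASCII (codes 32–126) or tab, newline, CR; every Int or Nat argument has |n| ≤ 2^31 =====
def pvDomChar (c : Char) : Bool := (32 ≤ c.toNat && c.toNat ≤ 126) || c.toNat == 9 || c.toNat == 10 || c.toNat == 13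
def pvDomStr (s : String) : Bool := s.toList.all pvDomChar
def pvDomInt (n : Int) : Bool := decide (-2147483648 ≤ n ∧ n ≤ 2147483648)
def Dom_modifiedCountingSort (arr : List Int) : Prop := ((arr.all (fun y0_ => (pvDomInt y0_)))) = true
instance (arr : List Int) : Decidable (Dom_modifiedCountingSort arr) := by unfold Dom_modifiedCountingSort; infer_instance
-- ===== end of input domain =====

-- B replaces A's hash-map frequency table by a sort-then-group-runs pass (alternative
-- algorithm, same results); equivalence is claimed on non-empty lists (Pre_), since
-- Python's max(arr) raises ValueError on the empty list.

-- ===== PORT A =====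
def modifiedCountingSort (arr : List Int) : Int :=
  match PySem.List.max? arr (fun x => x) with
  | none => 0  -- max([]) raises ValueError in Python; excluded by Pre_
  | some _maxElement =>
    let countArr := arr.foldl
      (fun countArr element =>
        if countArr.contains element then countArr.modify element 0 (· + 1)
        else countArr.insert element 1)
      PySem.Dict.empty
    countArr.keys.foldl
      (fun ans index =>
        let count := countArr.getD index 0
        ans + PySem.Int.floordiv (count * (count + 1)) 2)
      0

-- ===== PORT B =====
def modifiedCountingSort_alt (arr : List Int) : Int :=
  let st := (PySem.List.sorted arr (fun x => x) false).foldl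
    (fun (s : Int × Int × Option Int) x =>
      if s.2.1 ≠ 0 ∧ s.2.2 = some x then (s.1, s.2.1 + 1, s.2.2)
      else (s.1 + PySem.Int.floordiv (s.2.1 * (s.2.1 + 1)) 2, 1, some x))
    (0, 0, none)
  st.1 + PySem.Int.floordiv (st.2.1 * (st.2.1 + 1)) 2

-- ===== PRECONDITION & SPEC =====
-- Pre_ excludes only the empty list, on which Python's max(arr) raises ValueError.
def Pre_modifiedCountingSort (arr : List Int) : Prop := arr ≠ []
instance (arr : List Int) : Decidable (Pre_modifiedCountingSort arr) := by unfold Pre_modifiedCountingSort; infer_instance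
def pvWitness_modifiedCountingSort : List Int := [1, 2, 2]

def Spec_modifiedCountingSort (arr : List Int) (out : Int) : Prop := out = modifiedCountingSort_alt arr
instance (arr : List Int) (out : Int) : Decidable (Spec_modifiedCountingSort arr out) := by unfold Spec_modifiedCountingSort; infer_instance

-- ===== CLAIM (what is proved, stated in full; the proofs are below) =====
def Claim_equal_modifiedCountingSort : Prop := ∀ (arr : List Int), Dom_modifiedCountingSort arr → Pre_modifiedCountingSort arr → Spec_modifiedCountingSort arr (modifiedCountingSort arr)

-- ===== LEMMAS AND PROOFS =====

/-- Triangular number with Python's floor division, as both ports compute it. -/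
def pvTri (c : Int) : Int := PySem.Int.floordiv (c * (c + 1)) 2

/-- B's loop body, named for the proofs. -/
def pvStep (s : Int × Int × Option Int) (x : Int) : Int × Int × Option Int :=
  if s.2.1 ≠ 0 ∧ s.2.2 = some x then (s.1, s.2.1 + 1, s.2.2)
  else (s.1 + PySem.Int.floordiv (s.2.1 * (s.2.1 + 1)) 2, 1, some x)

theorem pvAlt_def (arr : List Int) :
    modifiedCountingSort_alt arr =
      ((PySem.List.sorted arr (fun x => x) false).foldl pvStep (0, 0, none)).1
        + pvTri ((PySem.List.sorted arr (fun x => x) false).foldl pvStep (0, 0, none)).2.1 := rfl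

/-- A's dict-update branch is exactly the counter update. -/
theorem pvStepA_eq (d : PySem.Dict Int Int) (e : Int) :
    (if d.contains e then d.modify e 0 (· + 1) else d.insert e 1) = d.modify e 0 (· + 1) := by
  by_cases h : d.contains e
  · simp [h]
  · have h2 : d.get? e = none := by
      rw [PySem.Dict.contains_eq_isSome_get?] at h
      simpa using h
    simp [h, PySem.Dict.modify, PySem.Dict.getD, h2]

/-- A computes the sum of pvTri(count v) over the distinct elements of arr. -/
theorem pvA_val (arr : List Int) (h : arr ≠ []) :
    modifiedCountingSort arr = ((PySem.Set.ofList arr).map (fun v => pvTri ((arr.count v : Int)))).sum := by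
  obtain ⟨m, hm⟩ : ∃ m, PySem.List.max? arr (fun x => x) = some m := by
    cases hc : PySem.List.max? arr (fun x => x) with
    | none => exact absurd ((PySem.List.max?_eq_none_iff arr (fun x => x)).mp hc) h
    | some m => exact ⟨m, rfl⟩
  unfold modifiedCountingSort
  rw [hm]
  have hctr : arr.foldl
      (fun countArr element =>
        if countArr.contains element then countArr.modify element 0 (· + 1)
        else countArr.insert element 1)
      PySem.Dict.empty = PySem.Dict.counter arr := by
    rw [PySem.Dict.counter_eq_foldl]
    exact PySem.List.foldl_congr_mem arr _ _ PySem.Dict.empty (fun d e _ => pvStepA_eq d e)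
  simp only [hctr]
  rw [PySem.List.foldl_add (PySem.Dict.counter arr).keys
    (fun index => PySem.Int.floordiv ((PySem.Dict.counter arr).getD index 0
      * ((PySem.Dict.counter arr).getD index 0 + 1)) 2) 0]
  simp [PySem.Dict.keys_counter, PySem.Dict.getD_counter, pvTri]

/-- count within a flatMap of replicates over a Nodup spine. -/
theorem pvCount_flat (ds : List Int) (cnt : Int → Nat) (hnd : ds.Nodup) (x : Int) :
    (ds.flatMap fun v => List.replicate (cnt v) v).count x = if x ∈ ds then cnt x else 0 := by
  induction ds with
  | nil => simp
  | cons d t ih =>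
    simp only [List.flatMap_cons, List.count_append, List.count_replicate]
    rcases List.nodup_cons.mp hnd with ⟨hd, hnt⟩
    rw [ih hnt]
    by_cases hx : x = d
    · subst hx
      simp [hd]
    · simp [hx, Ne.symm hx]

theorem pvPairwise_le_flat (ds : List Int) (cnt : Int → Nat) (hp : ds.Pairwise (· < ·)) :
    (ds.flatMap fun v => List.replicate (cnt v) v).Pairwise (· ≤ ·) := by
  induction ds with
  | nil => simp
  | cons d t ih =>
    simp only [List.flatMap_cons]
    rcases List.pairwise_cons.mp hp with ⟨hd, ht⟩
    rw [List.pairwise_append]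
    refine ⟨List.pairwise_replicate.mpr (by simp), ih ht, ?_⟩
    intro a ha b hb
    rw [List.eq_of_mem_replicate ha]
    obtain ⟨v, hv, hbv⟩ := List.mem_flatMap.mp hb
    rw [List.eq_of_mem_replicate hbv]
    exact le_of_lt (hd v hv)

/-- sorted(arr) is the concatenation of the runs of its distinct sorted values. -/
theorem pvSorted_flat (arr : List Int) :
    PySem.List.sorted arr (fun x => x) false =
      (PySem.List.sorted (PySem.Set.ofList arr) (fun x => x) false).flatMap
        (fun v => List.replicate (arr.count v) v) := by
  have hlt := PySem.List.sorted_ofList_pairwise_lt (xs := arr)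
  have hnd : (PySem.List.sorted (PySem.Set.ofList arr) (fun x => x) false).Nodup :=
    hlt.imp (fun h => ne_of_lt h)
  apply PySem.List.sorted_id_eq_of_perm_of_pairwise
  · rw [List.perm_iff_count]
    intro x
    rw [pvCount_flat _ _ hnd x]
    by_cases hx : x ∈ arr
    · simp [PySem.List.mem_sorted, PySem.Set.mem_ofList, hx]
    · simp [PySem.List.mem_sorted, PySem.Set.mem_ofList, hx,
        List.count_eq_zero_of_not_mem hx]
  · exact pvPairwise_le_flat _ _ hlt

/-- Extending a run: m more copies of the current value just bump the counter. -/
theorem pvRun_ext (m : Nat) (a r : Int) (v : Int) (hr : 1 ≤ r) :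
    (List.replicate m v).foldl pvStep (a, r, some v) = (a, r + (m : Int), some v) := by
  induction m generalizing r with
  | zero => simp
  | succ k ih =>
    rw [List.replicate_succ, List.foldl_cons]
    have hstep : pvStep (a, r, some v) v = (a, r + 1, some v) := by
      simp [pvStep]
      omega
    rw [hstep, ih (r + 1) (by omega)]
    have hk : r + 1 + (k : Int) = r + ((k + 1 : Nat) : Int) := by push_cast; ring
    rw [hk]

/-- Entering a fresh run closes the previous one. -/
theorem pvGroup_fold (v : Int) (c : Nat) (hc : 1 ≤ c) (rest : List Int) (a r : Int)
    (p : Option Int) (hp : p ≠ some v) :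
    (List.replicate c v ++ rest).foldl pvStep (a, r, p)
      = rest.foldl pvStep (a + pvTri r, (c : Int), some v) := by
  obtain ⟨k, rfl⟩ : ∃ k, c = k + 1 := ⟨c - 1, by omega⟩
  rw [List.replicate_succ, List.foldl_append, List.foldl_cons]
  have hstep : pvStep (a, r, p) v = (a + pvTri r, 1, some v) := by
    simp [pvStep, pvTri, hp]
  rw [hstep, pvRun_ext k _ _ _ (by omega)]
  have hk : (1 : Int) + (k : Int) = ((k + 1 : Nat) : Int) := by push_cast; ring
  rw [hk]

/-- Folding B's loop over all the runs accumulates the per-value triangles. -/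
theorem pvGroups (ds : List Int) (cnt : Int → Nat) (h1 : ∀ v ∈ ds, 1 ≤ cnt v)
    (hlt : ds.Pairwise (· < ·)) (a r : Int) (p : Option Int) (hp : ∀ v ∈ ds, p ≠ some v) :
    ((ds.flatMap fun v => List.replicate (cnt v) v).foldl pvStep (a, r, p)).1
      + pvTri (((ds.flatMap fun v => List.replicate (cnt v) v).foldl pvStep (a, r, p)).2.1)
      = a + pvTri r + (ds.map fun v => pvTri ((cnt v : Int))).sum := by
  induction ds generalizing a r p with
  | nil => simp
  | cons d t ih =>
    simp only [List.flatMap_cons, List.map_cons, List.sum_cons]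
    have hg := pvGroup_fold d (cnt d) (h1 d (by simp))
      (t.flatMap fun v => List.replicate (cnt v) v) a r p (hp d (by simp))
    rw [hg]
    rcases List.pairwise_cons.mp hlt with ⟨hd, ht⟩
    rw [ih (fun v hv => h1 v (by simp [hv])) ht _ _ _ (fun v hv => by
      simp only [ne_eq, Option.some.injEq]
      exact fun h => absurd h (ne_of_lt (hd v hv)))]
    ring

/-- B computes the same sum, over the sorted distinct elements. -/
theorem pvB_val (arr : List Int) :
    modifiedCountingSort_alt arr =
      ((PySem.List.sorted (PySem.Set.ofList arr) (fun x => x) false).map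
        (fun v => pvTri ((arr.count v : Int)))).sum := by
  rw [pvAlt_def, pvSorted_flat]
  have hlt := PySem.List.sorted_ofList_pairwise_lt (xs := arr)
  rw [pvGroups _ _ (fun v hv => by
        have : v ∈ arr := by
          rw [PySem.List.mem_sorted, PySem.Set.mem_ofList] at hv
          exact hv
        exact List.count_pos_iff.mpr this)
      hlt 0 0 none (fun v _ => by simp)]
  have h0 : pvTri 0 = 0 := by decide
  rw [h0]
  ring

-- ===== VERDICT (by name: the statement is the Claim_ definition above) =====
theorem modifiedCountingSort_spec : Claim_equal_modifiedCountingSort := by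
  intro arr _hdom hpre
  unfold Spec_modifiedCountingSort
  rw [pvA_val arr hpre, pvB_val arr]
  exact (((PySem.List.sorted_perm (PySem.Set.ofList arr) (fun x => x) false).map
    (fun v => pvTri ((arr.count v : Int)))).sum_eq).symm
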